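-- pv_equiv track=rewrite | github.com/avivohayon/NLP | ex2/ex2nlp.py | create_words_per_tag_dict
-- ===== SOURCE A (Python) =====
-- def create_words_per_tag_dict(tagged_text):
--     """
--     param: the text which each sentence is a tuple (word, tag)
--     return: word_per_tag_dict: dict where its keys: word, value: a dict of all the tags with the key as words
--     """
--     word_per_tag_dict = dict()
--     for sent in tagged_text:
--         for tagged_words in sent:
--             clean_tag = tagged_words[1]
--             if clean_tag not in word_per_tag_dict.keys():
--                 word_per_tag_dict[clean_tag] = dict()
--                 word_per_tag_dict[clean_tag][tagged_words[0]] = 1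
--             else:
--                 cur_new_words_dict = word_per_tag_dict[clean_tag]
--                 if tagged_words[0] not in cur_new_words_dict.keys():
--                     cur_new_words_dict[tagged_words[0]] = 1
--                 else:
--                     cur_new_words_dict[tagged_words[0]] += 1
--     return word_per_tag_dict
-- ===== SOURCE B (Python) =====
-- from collections import Counter
--
-- def create_words_per_tag_dict(tagged_text):
--     # Phase 1: one flat counting pass into a Counter keyed on (tag, word).
--     counts = Counter()
--     for sent in tagged_text:
--         for word, tag in sent:
--             counts[(tag, word)] += 1
--     # Phase 2: reshape the flat counts into the nested tag -> word -> count dict.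
--     result = {}
--     for (tag, word), c in counts.items():
--         result.setdefault(tag, {})[word] = c
--     return result
-- ===== Notes on version B (the rewrite author's own statement) =====
-- stated objective: alternative
-- what changed: B separates counting from structuring: one flat pass accumulates a Counter keyed on (tag, word), then a second pass over counts.items() reshapes the flat counts into the nested tag->word->count dict via setdefault, instead of A's inline nested-dict branching per token.
import Mathlib
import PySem

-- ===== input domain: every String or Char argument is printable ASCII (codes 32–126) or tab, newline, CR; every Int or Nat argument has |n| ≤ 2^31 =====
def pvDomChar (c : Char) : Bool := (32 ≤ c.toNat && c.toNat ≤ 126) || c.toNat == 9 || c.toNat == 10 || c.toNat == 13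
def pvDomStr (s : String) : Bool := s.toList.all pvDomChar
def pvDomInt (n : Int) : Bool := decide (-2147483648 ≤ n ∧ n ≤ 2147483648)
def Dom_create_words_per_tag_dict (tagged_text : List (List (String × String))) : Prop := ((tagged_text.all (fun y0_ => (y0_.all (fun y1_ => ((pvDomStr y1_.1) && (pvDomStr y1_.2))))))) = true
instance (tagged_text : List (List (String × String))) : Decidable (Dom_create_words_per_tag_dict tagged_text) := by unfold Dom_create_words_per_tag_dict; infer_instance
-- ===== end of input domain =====

-- B separates counting (one flat Counter pass keyed on (tag, word)) from structuring (a reshape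
-- pass over the counter's items); same cost, different decomposition ("alternative").


-- ===== PORT A =====
-- one inner-loop body of A: process one (word, tag) pair into the nested dict
def pvAStep (word_per_tag_dict : PySem.Dict String (PySem.Dict String Int))
    (tagged_words : String × String) : PySem.Dict String (PySem.Dict String Int) :=
  let clean_tag := tagged_words.2
  if word_per_tag_dict.contains clean_tag = false then
    word_per_tag_dict.insert clean_tag
      ((PySem.Dict.empty : PySem.Dict String Int).insert tagged_words.1 1)
  else
    let cur_new_words_dict := word_per_tag_dict.getD clean_tag PySem.Dict.empty
    if cur_new_words_dict.contains tagged_words.1 = false then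
      word_per_tag_dict.insert clean_tag (cur_new_words_dict.insert tagged_words.1 1)
    else
      word_per_tag_dict.insert clean_tag
        (cur_new_words_dict.insert tagged_words.1 (cur_new_words_dict.getD tagged_words.1 0 + 1))

def create_words_per_tag_dict (tagged_text : List (List (String × String))) :
    List (String × List (String × Int)) :=
  let word_per_tag_dict :=
    tagged_text.foldl (fun d sent => sent.foldl pvAStep d)
      (PySem.Dict.empty : PySem.Dict String (PySem.Dict String Int))
  word_per_tag_dict.items.map (fun q => (q.1, q.2.items))

-- ===== PORT B =====
-- one step of B's reshape pass: result.setdefault(tag, {})[word] = c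
def pvBNestStep (result : PySem.Dict String (PySem.Dict String Int))
    (q : (String × String) × Int) : PySem.Dict String (PySem.Dict String Int) :=
  result.insert q.1.1 ((result.getD q.1.1 PySem.Dict.empty).insert q.1.2 q.2)

def create_words_per_tag_dict_alt (tagged_text : List (List (String × String))) :
    List (String × List (String × Int)) :=
  let counts : PySem.Dict (String × String) Int :=
    tagged_text.foldl
      (fun c sent => sent.foldl (fun c p => c.modify (p.2, p.1) 0 (· + 1)) c)
      PySem.Dict.empty
  let result := counts.items.foldl pvBNestStep
    (PySem.Dict.empty : PySem.Dict String (PySem.Dict String Int))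
  result.items.map (fun q => (q.1, q.2.items))

-- ===== PRECONDITION & SPEC =====
def Spec_create_words_per_tag_dict (tagged_text : List (List (String × String))) (out : List (String × List (String × Int))) : Prop := out = create_words_per_tag_dict_alt tagged_text
instance (tagged_text : List (List (String × String))) (out : List (String × List (String × Int))) : Decidable (Spec_create_words_per_tag_dict tagged_text out) := by unfold Spec_create_words_per_tag_dict; infer_instance

-- ===== CLAIM (what is proved, stated in full; the proofs are below) =====
def Claim_equal_create_words_per_tag_dict : Prop := ∀ (tagged_text : List (List (String × String))), Dom_create_words_per_tag_dict tagged_text → Spec_create_words_per_tag_dict tagged_text (create_words_per_tag_dict tagged_text)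

-- ===== LEMMAS AND PROOFS =====

-- B's reshape fold, from an arbitrary accumulator (proof-side name for the fold in the port)
def pvNfold (r : PySem.Dict String (PySem.Dict String Int))
    (l : List ((String × String) × Int)) : PySem.Dict String (PySem.Dict String Int) :=
  l.foldl pvBNestStep r

-- A's third branch as a function: bump the count of word w under tag t
def pvBump (r : PySem.Dict String (PySem.Dict String Int)) (t w : String) :
    PySem.Dict String (PySem.Dict String Int) :=
  r.insert t ((r.getD t PySem.Dict.empty).insert w
    ((r.getD t PySem.Dict.empty).getD w 0 + 1))

-- == on a lawful BEq type is symmetric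
theorem pvBeqComm {α : Type} [BEq α] [LawfulBEq α] (a b : α) : (a == b) = (b == a) := by
  by_cases h : a = b
  · simp [h]
  · simp [h, Ne.symm h]

-- a nested foldl over sentences is a foldl over the flattened pair list
theorem pvFoldlFlat {α β : Type} (f : β → α → β) :
    ∀ (tt : List (List α)) (b : β),
      tt.foldl (fun d s => s.foldl f d) b = (tt.flatMap id).foldl f b := by
  intro tt
  induction tt with
  | nil => intro b; rfl
  | cons s tt ih =>
      intro b
      simp [List.flatMap_cons, List.foldl_append, ih]

-- two inserts at distinct keys commute when the first key is already present
theorem pvInsertComm {κ ν : Type} [BEq κ] [LawfulBEq κ] (d : PySem.Dict κ ν)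
    (k k' : κ) (a b : ν) (h : d.contains k = true) (hne : k' ≠ k) :
    (d.insert k a).insert k' b = (d.insert k' b).insert k a := by
  apply PySem.Dict.ext
  by_cases hc : d.contains k' = true
  · have h1 : (d.insert k a).contains k' = true := by
      rw [PySem.Dict.contains_insert]; simp [hc]
    have h2 : (d.insert k' b).contains k = true := by
      rw [PySem.Dict.contains_insert]; simp [h]
    rw [PySem.Dict.items_insert_of_contains _ b h1, PySem.Dict.items_insert_of_contains _ a h,
        PySem.Dict.items_insert_of_contains _ a h2, PySem.Dict.items_insert_of_contains _ b hc]
    simp only [List.map_map]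
    apply List.map_congr_left
    intro p _
    by_cases e1 : p.1 = k <;> by_cases e2 : p.1 = k' <;>
      simp_all [Function.comp, Ne.symm hne]
  · have hc' : d.contains k' = false := by simpa using hc
    have h1 : (d.insert k a).contains k' = false := by
      rw [PySem.Dict.contains_insert]; simp [hc', hne]
    have h2 : (d.insert k' b).contains k = true := by
      rw [PySem.Dict.contains_insert]; simp [h]
    rw [PySem.Dict.items_insert_of_not_contains _ b h1, PySem.Dict.items_insert_of_contains _ a h,
        PySem.Dict.items_insert_of_contains _ a h2, PySem.Dict.items_insert_of_not_contains _ b hc']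
    simp [hne]

-- which tags the reshape fold has seen
theorem pvF1 : ∀ (l : List ((String × String) × Int)) (t : String),
    (pvNfold PySem.Dict.empty l).contains t = l.any (fun q => q.1.1 == t) := by
  intro l
  induction l using List.reverseRecOn with
  | nil => intro t; simp [pvNfold, PySem.Dict.contains_empty]
  | append_singleton l q ih =>
      intro t
      simp only [pvNfold, List.foldl_append, List.foldl_cons, List.foldl_nil, pvBNestStep,
        PySem.Dict.contains_insert]
      rw [show List.foldl pvBNestStep PySem.Dict.empty l = pvNfold PySem.Dict.empty l from rfl, ih]
      rw [pvBeqComm t q.1.1]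
      simp only [List.any_append, List.any_cons, List.any_nil, Bool.or_false]
      exact (Bool.or_comm _ _)

-- which (tag, word) pairs the reshape fold has seen
theorem pvF2 : ∀ (l : List ((String × String) × Int)) (t w : String),
    ((pvNfold PySem.Dict.empty l).getD t PySem.Dict.empty).contains w
      = l.any (fun q => q.1 == (t, w)) := by
  intro l
  induction l using List.reverseRecOn with
  | nil => intro t w; simp [pvNfold, PySem.Dict.getD_empty, PySem.Dict.contains_empty]
  | append_singleton l q ih =>
      obtain ⟨⟨t', w'⟩, v'⟩ := q
      intro t w
      simp only [pvNfold, List.foldl_append, List.foldl_cons, List.foldl_nil, pvBNestStep]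
      rw [show List.foldl pvBNestStep PySem.Dict.empty l = pvNfold PySem.Dict.empty l from rfl]
      by_cases ht : t = t'
      · subst ht
        rw [PySem.Dict.getD_insert_self, PySem.Dict.contains_insert, ih]
        by_cases hw : w = w'
        · subst hw; simp
        · have e1 : (w == w') = false := beq_eq_false_iff_ne.mpr hw
          have e2 : (((t, w'), v').1 == (t, w)) = false := by
            apply beq_eq_false_iff_ne.mpr
            intro h
            rw [Prod.mk.injEq] at h
            exact hw h.2.symm
          simp [e1, e2]
      · rw [PySem.Dict.getD_insert_of_ne _ _ _ ht, ih]
        have e3 : (((t', w'), v').1 == (t, w)) = false := by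
          apply beq_eq_false_iff_ne.mpr
          intro h
          rw [Prod.mk.injEq] at h
          exact ht h.1.symm
        simp [e3]

-- bumping the count just written collapses to writing the bumped count
theorem pvBumpCollapse (M : PySem.Dict String (PySem.Dict String Int)) (t w : String) (v : Int) :
    pvBump (pvBNestStep M ((t, w), v)) t w = pvBNestStep M ((t, w), v + 1) := by
  simp [pvBump, pvBNestStep, PySem.Dict.getD_insert_self, PySem.Dict.insert_insert_self]

-- one reshape step commutes with pvBump at a pair it does not touch
theorem pvStepComm (r : PySem.Dict String (PySem.Dict String Int))
    (t w t' w' : String) (v' : Int)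
    (hq : (t', w') ≠ (t, w)) (h1 : r.contains t = true)
    (h2 : (r.getD t PySem.Dict.empty).contains w = true) :
    pvBNestStep (pvBump r t w) ((t', w'), v')
      = pvBump (pvBNestStep r ((t', w'), v')) t w := by
  by_cases ht : t' = t
  · subst ht
    have hw : w' ≠ w := by
      intro h; exact hq (by rw [h])
    simp only [pvBNestStep, pvBump, PySem.Dict.getD_insert_self, PySem.Dict.insert_insert_self]
    rw [PySem.Dict.getD_insert_of_ne _ _ _ (Ne.symm hw)]
    rw [pvInsertComm _ w w' _ v' h2 hw]
  · simp only [pvBNestStep, pvBump]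
    rw [PySem.Dict.getD_insert_of_ne _ _ _ ht]
    rw [PySem.Dict.getD_insert_of_ne _ _ _ (Ne.symm ht)]
    rw [pvInsertComm r t t' _ _ h1 ht]

-- the whole remaining reshape commutes with pvBump at an untouched pair
theorem pvComm : ∀ (l : List ((String × String) × Int))
    (r : PySem.Dict String (PySem.Dict String Int)) (t w : String),
    r.contains t = true → (r.getD t PySem.Dict.empty).contains w = true →
    (∀ q ∈ l, q.1 ≠ (t, w)) →
    pvNfold (pvBump r t w) l = pvBump (pvNfold r l) t w := by
  intro l
  induction l with
  | nil => intro r t w _ _ _; rfl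
  | cons q l ih =>
      intro r t w h1 h2 hl
      obtain ⟨⟨t', w'⟩, v'⟩ := q
      have hq : (t', w') ≠ (t, w) := hl ((t', w'), v') (by simp)
      have h1' : (pvBNestStep r ((t', w'), v')).contains t = true := by
        simp only [pvBNestStep, PySem.Dict.contains_insert, h1]
        simp
      have h2' : ((pvBNestStep r ((t', w'), v')).getD t PySem.Dict.empty).contains w = true := by
        simp only [pvBNestStep]
        by_cases ht : t = t'
        · subst ht
          rw [PySem.Dict.getD_insert_self, PySem.Dict.contains_insert, h2]
          simp
        · rw [PySem.Dict.getD_insert_of_ne _ _ _ ht]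
          exact h2
      calc pvNfold (pvBump r t w) (((t', w'), v') :: l)
          = pvNfold (pvBNestStep (pvBump r t w) ((t', w'), v')) l := rfl
        _ = pvNfold (pvBump (pvBNestStep r ((t', w'), v')) t w) l := by
            rw [pvStepComm r t w t' w' v' hq h1 h2]
        _ = pvBump (pvNfold (pvBNestStep r ((t', w'), v')) l) t w :=
            ih _ t w h1' h2' (fun p hp => hl p (by simp [hp]))
        _ = pvBump (pvNfold r (((t', w'), v') :: l)) t w := rfl

-- mapping the counter's in-place bump over entries with other keys changes nothing
theorem pvMapId (t w : String) (v1 : Int) :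
    ∀ (l : List ((String × String) × Int)), (∀ q ∈ l, q.1 ≠ (t, w)) →
      l.map (fun p => if (p.1 == (t, w)) = true then ((t, w), v1) else p) = l := by
  intro l
  induction l with
  | nil => intro _; rfl
  | cons q l ih =>
      intro hl
      have hq : q.1 ≠ (t, w) := hl q (by simp)
      simp only [List.map_cons, ih (fun p hp => hl p (by simp [hp]))]
      rw [if_neg (by simp [hq])]

-- MAIN: reshaping the flat counter of the pair list equals A's inline nested fold
theorem pvMain : ∀ (ps : List (String × String)),
    pvNfold PySem.Dict.empty
        ((ps.foldl (fun c p => c.modify (p.2, p.1) 0 (· + 1))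
          (PySem.Dict.empty : PySem.Dict (String × String) Int)).items)
      = ps.foldl pvAStep PySem.Dict.empty := by
  intro ps
  induction ps using List.reverseRecOn with
  | nil => rfl
  | append_singleton ps p ih =>
      obtain ⟨w, t⟩ := p
      set c : PySem.Dict (String × String) Int :=
        ps.foldl (fun c p => c.modify (p.2, p.1) 0 (· + 1)) PySem.Dict.empty with hc_def
      have hnd : c.keys.Nodup := by
        rw [hc_def]
        exact PySem.Dict.nodup_keys_foldl_modify_key ps (fun p => (p.2, p.1)) 0
          (fun _ _ => (· + 1)) PySem.Dict.empty PySem.Dict.nodup_keys_empty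
      have hstep : (ps ++ [(w, t)]).foldl (fun c p => c.modify (p.2, p.1) 0 (· + 1))
          (PySem.Dict.empty : PySem.Dict (String × String) Int)
          = c.insert (t, w) (c.getD (t, w) 0 + 1) := by
        rw [List.foldl_append]; rfl
      rw [hstep, List.foldl_append, List.foldl_cons, List.foldl_nil]
      set N : PySem.Dict String (PySem.Dict String Int) := ps.foldl pvAStep PySem.Dict.empty
        with hN_def
      by_cases hc : c.contains (t, w) = true
      · -- the pair was seen before: the counter bumps in place, A takes its += branch
        obtain ⟨v, hv⟩ : ∃ v, c.get? (t, w) = some v := by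
          rw [PySem.Dict.contains_eq_isSome_get?] at hc
          exact Option.isSome_iff_exists.mp hc
        have hV : c.getD (t, w) 0 = v := PySem.Dict.getD_of_get?_eq_some c 0 hv
        have hmem : ((t, w), v) ∈ c.items := PySem.Dict.mem_items_of_get?_eq_some c hv
        obtain ⟨l₁, l₂, hsplit⟩ := List.append_of_mem hmem
        have hkeys : c.keys = c.items.map (fun q => q.1) := by
          simp [PySem.Dict.keys]
        have hnodup : (l₁.map (fun q => q.1) ++ (t, w) :: l₂.map (fun q => q.1)).Nodup := by
          have h0 := hnd
          rw [hkeys, hsplit] at h0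
          simpa using h0
        have hTail : ((t, w) :: l₂.map (fun q => q.1)).Nodup :=
          hnodup.sublist (List.sublist_append_right _ _)
        have hB : ∀ q ∈ l₂, q.1 ≠ (t, w) := by
          intro q hq he
          exact (List.nodup_cons.mp hTail).1 (he ▸ List.mem_map_of_mem hq)
        have hDisj := List.disjoint_of_nodup_append hnodup
        have hA : ∀ q ∈ l₁, q.1 ≠ (t, w) := by
          intro q hq he
          have hm : (t, w) ∈ List.map (fun q => q.1) l₁ := by
            rw [← he]; exact List.mem_map_of_mem hq
          exact hDisj hm (by simp)
        have hitems : (c.insert (t, w) (c.getD (t, w) 0 + 1)).items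
            = l₁ ++ ((t, w), v + 1) :: l₂ := by
          rw [PySem.Dict.items_insert_of_contains _ _ hc, hV, hsplit]
          simp only [List.map_append, List.map_cons]
          rw [pvMapId t w (v + 1) l₁ hA, pvMapId t w (v + 1) l₂ hB]
          simp
        rw [hitems]
        have hF1 : N.contains t = true := by
          rw [← ih, pvF1, hsplit]
          exact List.any_eq_true.mpr ⟨((t, w), v), by simp, by simp⟩
        have hF2 : (N.getD t PySem.Dict.empty).contains w = true := by
          rw [← ih, pvF2, hsplit]
          exact List.any_eq_true.mpr ⟨((t, w), v), by simp, by simp⟩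
        have lhs_eq : pvNfold PySem.Dict.empty (l₁ ++ ((t, w), v + 1) :: l₂)
            = pvBump N t w := by
          have e1 : pvNfold PySem.Dict.empty (l₁ ++ ((t, w), v + 1) :: l₂)
              = pvNfold (pvBNestStep (pvNfold PySem.Dict.empty l₁) ((t, w), v + 1)) l₂ := by
            simp [pvNfold, List.foldl_append]
          have e2 : pvBNestStep (pvNfold PySem.Dict.empty l₁) ((t, w), v + 1)
              = pvBump (pvBNestStep (pvNfold PySem.Dict.empty l₁) ((t, w), v)) t w :=
            (pvBumpCollapse _ t w v).symm
          have h1 : (pvBNestStep (pvNfold PySem.Dict.empty l₁) ((t, w), v)).contains t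
              = true := by
            simp [pvBNestStep, PySem.Dict.contains_insert_self]
          have h2 : ((pvBNestStep (pvNfold PySem.Dict.empty l₁) ((t, w), v)).getD t
              PySem.Dict.empty).contains w = true := by
            simp [pvBNestStep, PySem.Dict.getD_insert_self, PySem.Dict.contains_insert_self]
          rw [e1, e2, pvComm l₂ _ t w h1 h2 hB]
          have e3 : pvNfold (pvBNestStep (pvNfold PySem.Dict.empty l₁) ((t, w), v)) l₂
              = pvNfold PySem.Dict.empty (l₁ ++ ((t, w), v) :: l₂) := by
            simp [pvNfold, List.foldl_append]
          rw [e3, ← hsplit, ih]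
        rw [lhs_eq]
        show pvBump N t w = pvAStep N (w, t)
        simp only [pvAStep, hF1, hF2, pvBump]
        rfl
      · -- fresh pair: the counter appends ((t,w),1), A starts a new entry
        have hc' : c.contains (t, w) = false := by simpa using hc
        have hitems : (c.insert (t, w) (c.getD (t, w) 0 + 1)).items
            = c.items ++ [((t, w), 1)] := by
          rw [PySem.Dict.items_insert_of_not_contains _ _ hc',
              PySem.Dict.getD_of_not_contains _ _ hc']
          norm_num
        rw [hitems]
        have e1 : pvNfold PySem.Dict.empty (c.items ++ [((t, w), 1)])
            = pvBNestStep (pvNfold PySem.Dict.empty c.items) ((t, w), 1) := by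
          simp [pvNfold, List.foldl_append]
        have hw : (N.getD t PySem.Dict.empty).contains w = false := by
          rw [← ih, pvF2]
          simp only [List.any_eq_false]
          intro q hq hqe
          have h1 : q.1 = (t, w) := by simpa using hqe
          have h2 : (t, w) ∈ c.keys := by
            rw [show c.keys = c.items.map (fun q => q.1) from by simp [PySem.Dict.keys]]
            exact h1 ▸ List.mem_map_of_mem hq
          rw [← PySem.Dict.contains_iff_mem_keys] at h2
          rw [hc'] at h2
          exact Bool.false_ne_true h2
        rw [e1, ih]
        show pvBNestStep N ((t, w), 1) = pvAStep N (w, t)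
        by_cases ht : N.contains t = true
        · have hw' : ¬ (N.getD t PySem.Dict.empty).contains w = false → False := fun h => h hw
          simp only [pvAStep, ht, pvBNestStep, hw]
          rfl
        · have ht' : N.contains t = false := by simpa using ht
          simp only [pvAStep, ht', pvBNestStep]
          rw [PySem.Dict.getD_of_not_contains _ _ ht']
          rfl

-- ===== VERDICT (by name: the statement is the Claim_ definition above) =====
theorem create_words_per_tag_dict_spec : Claim_equal_create_words_per_tag_dict := by
  intro tagged_text _
  unfold Spec_create_words_per_tag_dict
  simp only [create_words_per_tag_dict, create_words_per_tag_dict_alt]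
  rw [pvFoldlFlat pvAStep,
      pvFoldlFlat (fun (c : PySem.Dict (String × String) Int) (p : String × String) =>
        c.modify (p.2, p.1) 0 (· + 1)),
      ← pvMain (tagged_text.flatMap id)]
  rfl
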